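-- pv_equiv track=rewrite | github.com/hmiladhia/ConfigDmanager | configDmanager/_config.py | __remove_escaped
-- ===== SOURCE A (Python) =====
-- def __remove_escaped(text, escape_char):
--     is_escaped = False
--     res = ""
--     for c in text:
--         if is_escaped:
--             res += c
--             is_escaped = False
--         else:
--             if c == escape_char:
--                 is_escaped = True
--             else:
--                 res += c
--     return res
-- ===== SOURCE B (Python) =====
-- def __remove_escaped(text, escape_char):
--     # Chunk-scanning: find each occurrence of the escape char, copy the chunk
--     # before it and the single escaped character after it.
--     if len(escape_char) != 1:
--         return text
--     parts = []
--     rest = text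
--     while True:
--         idx = rest.find(escape_char)
--         if idx == -1:
--             parts.append(rest)
--             break
--         parts.append(rest[:idx])
--         parts.append(rest[idx + 1:idx + 2])
--         rest = rest[idx + 2:]
--     return ''.join(parts)
-- ===== Notes on version B (the rewrite author's own statement) =====
-- stated objective: faster
-- what changed: Replaces the per-character escaped-flag state machine with a find-based chunk scanner: repeatedly locate the next escape character with str.find, emit the chunk before it and the single escaped character after it, and join the parts (multi-/zero-length escape_char returns text unchanged, as A's per-char comparison never matches).
import Mathlib
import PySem

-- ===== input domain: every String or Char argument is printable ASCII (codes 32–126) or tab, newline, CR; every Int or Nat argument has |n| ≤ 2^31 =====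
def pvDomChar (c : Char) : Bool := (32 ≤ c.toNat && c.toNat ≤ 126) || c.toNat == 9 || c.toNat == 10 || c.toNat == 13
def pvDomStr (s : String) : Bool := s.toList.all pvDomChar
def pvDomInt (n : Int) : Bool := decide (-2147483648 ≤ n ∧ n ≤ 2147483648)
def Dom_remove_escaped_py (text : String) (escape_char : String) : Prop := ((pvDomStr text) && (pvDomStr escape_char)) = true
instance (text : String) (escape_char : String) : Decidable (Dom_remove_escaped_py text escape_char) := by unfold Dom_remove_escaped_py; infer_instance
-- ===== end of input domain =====

-- B replaces A's per-character escaped-flag state machine by a find-based chunk scanner (alternative decomposition, same return value).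

-- ===== PORT A =====
-- Literal port of A: fold over the characters with state (is_escaped, res);
-- the Python str accumulator `res` is carried as a List Char and converted at the end.
def remove_escaped_py (text : String) (escape_char : String) : String :=
  let st := text.toList.foldl
    (fun (st : Bool × List Char) c =>
      if st.1 then (false, st.2 ++ [c])
      else if [c] = escape_char.toList then (true, st.2)   -- c == escape_char
      else (st.1, st.2 ++ [c]))
    (false, ([] : List Char))
  String.ofList st.2

-- ===== PORT B =====
-- The while-loop of Source B: each iteration finds the next escape char in `rest`,
-- emits rest[:idx] and rest[idx+1:idx+2], and continues on rest[idx+2:].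
-- `he` only certifies termination (Source B reaches the loop only when len(escape_char) == 1).
def pvChunks (e : List Char) (he : e ≠ []) (rest : List Char) : List (List Char) :=
  let idx := PySem.Chars.find rest e
  if h : idx = -1 then [rest]
  else
    PySem.List.slice rest none (some idx) ::
    PySem.List.slice rest (some (idx + 1)) (some (idx + 2)) ::
    pvChunks e he (PySem.List.slice rest (some (idx + 2)) none)
termination_by rest.length
decreasing_by
  have h0 : (0:Int) ≤ idx := by
    have := PySem.Chars.neg_one_le_find rest e
    omega
  have hinf : e <:+: rest := (PySem.Chars.find_ne_neg_one_iff rest e).mp h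
  have hne : rest ≠ [] := by
    intro hr; subst hr
    exact he (List.eq_nil_of_infix_nil hinf)
  rw [PySem.List.slice_from rest (show (0:Int) ≤ idx + 2 by omega)]
  simp only [List.length_drop]
  have : 0 < rest.length := List.length_pos_of_ne_nil hne
  omega

def remove_escaped_py_alt (text : String) (escape_char : String) : String :=
  if h : PySem.Str.len escape_char ≠ 1 then text
  else
    -- ''.join(parts)
    String.ofList (pvChunks escape_char.toList
      (by
        have h1 : PySem.Str.len escape_char = 1 := of_not_not h
        intro hnil
        simp [PySem.Str.len, hnil] at h1)
      text.toList).flatten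

-- ===== PRECONDITION & SPEC =====
def Spec_remove_escaped_py (text : String) (escape_char : String) (out : String) : Prop := out = remove_escaped_py_alt text escape_char
instance (text : String) (escape_char : String) (out : String) : Decidable (Spec_remove_escaped_py text escape_char out) := by unfold Spec_remove_escaped_py; infer_instance

-- ===== CLAIM (what is proved, stated in full; the proofs are below) =====
def Claim_equal_remove_escaped_py : Prop := ∀ (text : String) (escape_char : String), Dom_remove_escaped_py text escape_char → Spec_remove_escaped_py text escape_char (remove_escaped_py text escape_char)

-- ===== LEMMAS AND PROOFS =====

-- A's state machine, without the accumulator.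
def pvGoA (e : List Char) : Bool → List Char → List Char
  | _, [] => []
  | true, c :: cs => c :: pvGoA e false cs
  | false, c :: cs => if [c] = e then pvGoA e true cs else c :: pvGoA e false cs

lemma pvFoldA (e : List Char) (cs : List Char) : ∀ (b : Bool) (acc : List Char),
    (cs.foldl
      (fun (st : Bool × List Char) c =>
        if st.1 then (false, st.2 ++ [c])
        else if [c] = e then (true, st.2)
        else (st.1, st.2 ++ [c]))
      (b, acc)).2 = acc ++ pvGoA e b cs := by
  induction cs with
  | nil => intro b acc; cases b <;> simp [pvGoA]
  | cons c cs ih =>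
    intro b acc
    cases b with
    | true => simp [pvGoA, ih]
    | false =>
      by_cases hc : [c] = e
      · simp [pvGoA, hc, ih]
      · simp [pvGoA, hc, ih]

lemma pvGoA_no_esc (ech : Char) (pre l : List Char) (hp : ech ∉ pre) :
    pvGoA [ech] false (pre ++ l) = pre ++ pvGoA [ech] false l := by
  induction pre with
  | nil => simp
  | cons c cs ih =>
    simp only [List.mem_cons, not_or] at hp
    have hc : ¬(([c] : List Char) = [ech]) := by simpa using Ne.symm hp.1
    simp [pvGoA, List.cons_append, hc, ih hp.2]

lemma pvChunks_eq (ech : Char) (e : List Char) (hech : e = [ech]) (he : e ≠ []) :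
    ∀ (n : Nat) (rest : List Char), rest.length ≤ n →
      (pvChunks e he rest).flatten = pvGoA e false rest := by
  subst hech
  intro n
  induction n with
  | zero =>
    intro rest hlen
    have : rest = [] := List.eq_nil_of_length_eq_zero (Nat.le_zero.mp hlen)
    subst this
    rw [pvChunks]
    have hfind : PySem.Chars.find [] [ech] = -1 := by
      rw [PySem.Chars.find_eq_neg_one_iff]
      intro hinf
      exact (List.cons_ne_nil _ _) (List.eq_nil_of_infix_nil hinf)
    simp [hfind, pvGoA]
  | succ n ih =>
    intro rest hlen
    rw [pvChunks]
    by_cases hfind : PySem.Chars.find rest [ech] = -1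
    · simp only [hfind, dif_pos]
      simp only [List.flatten]
      have hmem : ech ∉ rest := by
        intro hm
        obtain ⟨s, t, hst⟩ := List.mem_iff_append.mp hm
        exact (PySem.Chars.find_eq_neg_one_iff rest [ech]).mp hfind
          ⟨s, t, by simpa using hst.symm⟩
      simpa [pvGoA] using (pvGoA_no_esc ech rest [] hmem).symm
    · have h0 : (0 : Int) ≤ PySem.Chars.find rest [ech] := by
        have := PySem.Chars.neg_one_le_find rest [ech]
        omega
      obtain ⟨hpre, hmin⟩ := PySem.Chars.find_spec h0
      set k := (PySem.Chars.find rest [ech]).toNat with hk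
      obtain ⟨rest2, hrest2⟩ : ∃ rest2, rest.drop k = ech :: rest2 := by
        obtain ⟨t, ht⟩ := hpre
        exact ⟨t, by simpa using ht.symm⟩
      have hklt : k < rest.length := by
        by_contra hge
        rw [List.drop_eq_nil_of_le (by omega)] at hrest2
        exact List.cons_ne_nil _ _ hrest2.symm
      have hsplit : rest = rest.take k ++ ech :: rest2 := by
        conv_lhs => rw [← List.take_append_drop k rest]
        rw [hrest2]
      have htklen : (rest.take k).length = k := List.length_take_of_le (by omega)
      have hnotmem : ech ∉ rest.take k := by
        intro hm
        obtain ⟨i, hi, hgi⟩ := List.getElem_of_mem hm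
        rw [List.length_take] at hi
        have hilt : i < rest.length := by omega
        have : ([ech] : List Char) <+: rest.drop i := by
          rw [List.drop_eq_getElem_cons hilt]
          have : rest[i] = ech := by
            rw [← hgi, List.getElem_take]
          exact ⟨rest.drop (i + 1), by simp [this]⟩
        exact hmin i (by omega) this
      -- evaluate the three slices
      have hs1 : PySem.List.slice rest none (some (PySem.Chars.find rest [ech])) = rest.take k := by
        rw [PySem.List.slice_to rest h0]
      have hdrop1 : rest.drop (k + 1) = rest2 := by
        have := congrArg (List.drop 1) hrest2
        simpa [List.drop_drop, Nat.add_comm] using this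
      have hs2 : PySem.List.slice rest (some (PySem.Chars.find rest [ech] + 1))
          (some (PySem.Chars.find rest [ech] + 2)) = rest2.take 1 := by
        rw [PySem.List.slice_toNat rest (by omega) (by omega)]
        have h1 : (PySem.Chars.find rest [ech] + 1).toNat = k + 1 := by omega
        have h2 : (PySem.Chars.find rest [ech] + 2).toNat = k + 2 := by omega
        rw [h1, h2, hdrop1]
        congr 1
        omega
      have hs3 : PySem.List.slice rest (some (PySem.Chars.find rest [ech] + 2)) none = rest2.drop 1 := by
        rw [PySem.List.slice_from rest (by omega)]
        have h2 : (PySem.Chars.find rest [ech] + 2).toNat = k + 2 := by omega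
        rw [h2, ← hdrop1, List.drop_drop]
      have hih : (pvChunks [ech] he (rest2.drop 1)).flatten = pvGoA [ech] false (rest2.drop 1) := by
        apply ih
        have : rest.length = k + 1 + rest2.length := by
          rw [hsplit]; simp [htklen]; omega
        have := List.length_drop (l := rest2) (i := 1)
        omega
      simp only [dif_neg hfind, List.flatten_cons, hs1, hs2, hs3, hih]
      -- right-hand side
      conv_rhs => rw [hsplit]
      rw [pvGoA_no_esc ech _ _ hnotmem]
      cases rest2 with
      | nil => simp [pvGoA]
      | cons d r => simp [pvGoA]

lemma pvGoA_id (e : List Char) (hlen : e.length ≠ 1) : ∀ cs, pvGoA e false cs = cs := by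
  intro cs
  induction cs with
  | nil => rfl
  | cons c cs ih =>
    have hc : ¬(([c] : List Char) = e) := by
      intro hce; exact hlen (by rw [← hce]; rfl)
    simp [pvGoA, hc, ih]

-- ===== VERDICT (by name: the statement is the Claim_ definition above) =====
theorem remove_escaped_py_spec : Claim_equal_remove_escaped_py := by
  intro text escape_char _
  unfold Spec_remove_escaped_py
  simp only [remove_escaped_py, remove_escaped_py_alt]
  rw [pvFoldA escape_char.toList text.toList false []]
  by_cases h : PySem.Str.len escape_char ≠ 1
  · rw [dif_pos h]
    have hlen : escape_char.toList.length ≠ 1 := by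
      simpa [PySem.Str.len] using h
    simp [pvGoA_id escape_char.toList hlen]
  · rw [dif_neg h]
    have h1 : escape_char.toList.length = 1 := by
      have := of_not_not h
      simpa [PySem.Str.len] using this
    obtain ⟨ech, hech⟩ := List.length_eq_one_iff.mp h1
    rw [pvChunks_eq ech escape_char.toList hech _ text.toList.length text.toList le_rfl]
    simp
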